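-- pv_equiv track=rewrite | github.com/uniyalmanas/NoFeeSwap | operator_repo/tests/Nofee.py | encodeCurve
-- ===== SOURCE A (Python) =====
-- def encodeCurve(curve):
--     encodedCurve = [0]*((len(curve) + 3) // 4)
--     shift = 192
--     index = 0
--     for point in curve:
--         encodedCurve[index // 4] += (point << shift)
--         shift -= 64
--         shift = shift % 256
--         index += 1
--     return encodedCurve
-- ===== SOURCE B (Python) =====
-- def encodeCurve(curve):
--     words = []
--     start = 0
--     while start < len(curve):
--         word = 0
--         for j, point in enumerate(curve[start:start + 4]):
--             word += point << (192 - 64 * j)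
--         words.append(word)
--         start += 4
--     return words
-- ===== Notes on version B (the rewrite author's own statement) =====
-- stated objective: simpler
-- what changed: Replaced A's preallocated result array with flat index/shift-cycling bookkeeping (shift -= 64; shift %= 256; index += 1) by a chunk-of-4 decomposition: a while loop over chunk starts that packs each 256-bit word independently from enumerate(curve[start:start+4]) and appends it.
import Mathlib
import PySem

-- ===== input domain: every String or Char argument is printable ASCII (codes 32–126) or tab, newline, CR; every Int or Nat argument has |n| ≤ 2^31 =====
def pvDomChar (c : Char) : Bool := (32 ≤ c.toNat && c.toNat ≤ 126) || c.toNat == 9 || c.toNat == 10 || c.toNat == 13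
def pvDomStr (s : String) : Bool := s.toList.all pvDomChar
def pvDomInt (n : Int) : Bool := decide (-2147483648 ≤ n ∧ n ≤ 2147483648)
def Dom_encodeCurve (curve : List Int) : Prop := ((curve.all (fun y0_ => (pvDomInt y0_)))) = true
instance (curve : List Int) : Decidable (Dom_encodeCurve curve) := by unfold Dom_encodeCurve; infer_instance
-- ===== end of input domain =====

-- B replaces A's preallocated word array with mutable shift/index bookkeeping by a
-- chunk-of-4 decomposition that packs each 256-bit word independently (objective: simpler).

-- ===== PORT A =====
-- loop state: (encodedCurve, shift, index); Python's index is always a nonnegative int,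
-- so Nat with Nat division (= index // 4) is exact.  `enc.getD _ 0` reads
-- encodedCurve[index // 4], which is always in range (the lemmas below show it reads the
-- middle element of done ++ word :: zeros).  `point << shift` is point <<< shift.toNat:
-- shift stays in [0, 256) so toNat is exact.
def pvLoopA : List Int → Int → Nat → List Int → List Int
  | enc, _, _, [] => enc
  | enc, shift, index, point :: rest =>
      pvLoopA (enc.set (index / 4) (enc.getD (index / 4) 0 + (point <<< shift.toNat)))
        (PySem.Int.mod (shift - 64) 256) (index + 1) rest

def encodeCurve (curve : List Int) : List Int :=
  pvLoopA (List.replicate ((curve.length + 3) / 4) 0) 192 0 curve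

-- ===== PORT B =====
-- inner loop: word accumulation over enumerate(curve[start:start+4]); j ∈ {0,1,2,3} so
-- 192 - 64*j ≥ 0 and (192 - 64*j).toNat is Python's nonnegative shift amount exactly.
def pvPackWord (chunk : List Int) : Int :=
  (PySem.List.enumerate chunk 0).foldl (fun w jp => w + (jp.2 <<< (192 - 64 * jp.1).toNat)) 0

-- outer `while start < len(curve)` loop; Python's start is a nonnegative int, Nat is exact.
def pvOuter (curve : List Int) (words : List Int) (start : Nat) : List Int :=
  if start < curve.length then
    pvOuter curve
      (words ++ [pvPackWord (PySem.List.slice curve (some (start : Int)) (some ((start : Int) + 4)))])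
      (start + 4)
  else words
termination_by curve.length - start

def encodeCurve_alt (curve : List Int) : List Int :=
  pvOuter curve [] 0

-- ===== PRECONDITION & SPEC =====
def Spec_encodeCurve (curve : List Int) (out : List Int) : Prop := out = encodeCurve_alt curve
instance (curve : List Int) (out : List Int) : Decidable (Spec_encodeCurve curve out) := by unfold Spec_encodeCurve; infer_instance

-- ===== CLAIM (what is proved, stated in full; the proofs are below) =====
def Claim_equal_encodeCurve : Prop := ∀ (curve : List Int), Dom_encodeCurve curve → Spec_encodeCurve curve (encodeCurve curve)

-- ===== LEMMAS AND PROOFS =====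

-- proof-only middle ground: the chunked encoding as structural recursion on the list.
def pvChunks : List Int → List Int
  | [] => []
  | p :: rest => pvPackWord (List.take 4 (p :: rest)) :: pvChunks (List.drop 4 (p :: rest))
termination_by l => l.length
decreasing_by simp

lemma pv_chunks_of_ne_nil (l : List Int) (h : l ≠ []) :
    pvChunks l = pvPackWord (l.take 4) :: pvChunks (l.drop 4) := by
  cases l with
  | nil => exact absurd rfl h
  | cons p rest => rw [pvChunks]

lemma pv_set_mid (l t : List Int) (w v : Int) : (l ++ w :: t).set l.length v = l ++ v :: t := by
  induction l with
  | nil => rfl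
  | cons x xs ih => simp [ih]

lemma pv_getD_mid (l t : List Int) (w : Int) : (l ++ w :: t).getD l.length 0 = w := by
  simp [List.getD]

-- A's loop invariant: with `done` finished words, a fresh word slot in front of the
-- remaining zeros, shift back at 192 and index = 4 * done.length, the loop produces
-- `done` followed by the chunked encoding of the remaining points.
lemma pv_loopA_chunks (rest : List Int) : ∀ (done : List Int),
    pvLoopA (done ++ List.replicate ((rest.length + 3) / 4) 0) 192 (4 * done.length) rest
      = done ++ pvChunks rest := by
  intro done
  have d0 : (4 * done.length) / 4 = done.length := by omega
  have d1 : (4 * done.length + 1) / 4 = done.length := by omega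
  have d2 : (4 * done.length + 1 + 1) / 4 = done.length := by omega
  have d3 : (4 * done.length + 1 + 1 + 1) / 4 = done.length := by omega
  have s1 : PySem.Int.mod ((192:Int) - 64) 256 = 128 := by decide
  have s2 : PySem.Int.mod ((128:Int) - 64) 256 = 64 := by decide
  have s3 : PySem.Int.mod ((64:Int) - 64) 256 = 0 := by decide
  have s4 : PySem.Int.mod ((0:Int) - 64) 256 = 192 := by decide
  match rest with
  | [] => simp [pvLoopA, pvChunks]
  | [a] =>
    simp only [List.length_cons, List.length_nil, pvLoopA, d0, List.replicate,
      pv_getD_mid, pv_set_mid]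
    simp [pvChunks, pvPackWord, PySem.List.enumerate]
  | [a, b] =>
    simp only [List.length_cons, List.length_nil, pvLoopA, d0, d1, List.replicate,
      pv_getD_mid, pv_set_mid, s1]
    simp [pvChunks, pvPackWord, PySem.List.enumerate]
  | [a, b, c] =>
    simp only [List.length_cons, List.length_nil, pvLoopA, d0, d1, d2, List.replicate,
      pv_getD_mid, pv_set_mid, s1, s2]
    simp [pvChunks, pvPackWord, PySem.List.enumerate]
  | a :: b :: c :: d :: t =>
    have hr : ((t.length + 1 + 1 + 1 + 1) + 3) / 4 = (t.length + 3) / 4 + 1 := by omega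
    have ih := pv_loopA_chunks t
    simp only [List.length_cons, hr, List.replicate_succ, pvLoopA, d0, d1, d2, d3,
      pv_getD_mid, pv_set_mid, s1, s2, s3, s4]
    rw [List.append_cons done _ (List.replicate ((t.length + 3) / 4) 0)]
    have e4 : 4 * done.length + 1 + 1 + 1 + 1
        = 4 * (done ++ [0 + a <<< (192:Int).toNat + b <<< (128:Int).toNat
              + c <<< (64:Int).toNat + d <<< (0:Int).toNat]).length := by
      simp; omega
    rw [e4, ih]
    simp [pvChunks, pvPackWord, PySem.List.enumerate]
termination_by rest.length
decreasing_by simp; omega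

-- B's while-loop invariant: the remaining work is the chunked encoding of curve.drop start.
lemma pv_outer_chunks (curve : List Int) : ∀ (start : Nat) (words : List Int),
    pvOuter curve words start = words ++ pvChunks (curve.drop start) := by
  intro start words
  rw [pvOuter]
  split
  · next h =>
    have hslice : PySem.List.slice curve (some (start : Int)) (some ((start : Int) + 4))
        = (curve.drop start).take 4 := by
      have := PySem.List.slice_natCast_add curve start 4
      simpa using this
    rw [pv_outer_chunks curve (start + 4) _, hslice,
      pv_chunks_of_ne_nil (curve.drop start) (by simp; omega)]
    simp [List.drop_drop]
  · next h =>
    have : curve.drop start = [] := by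
      simp; omega
    simp [this, pvChunks]
termination_by start => curve.length - start
decreasing_by omega

-- ===== VERDICT (by name: the statement is the Claim_ definition above) =====
theorem encodeCurve_spec : Claim_equal_encodeCurve := by
  intro curve _
  show encodeCurve curve = encodeCurve_alt curve
  rw [encodeCurve_alt, pv_outer_chunks curve 0 []]
  simpa [encodeCurve] using pv_loopA_chunks curve []
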